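-- pv_equiv track=rewrite | github.com/yuping-wu/EDU-VL | model/utils.py | label_filter
-- ===== SOURCE A (Python) =====
-- def label_filter(labs):
--     rt_list = []
--     cur_min_cnt = 100
--     for l in labs:
--         s = sum(l)
--         if s < cur_min_cnt:
--             cur_min_cnt = s
--             rt_list.insert(0, l)
--         else:
--             rt_list.append(l)
--     return rt_list
-- ===== SOURCE B (Python) =====
-- def label_filter(labs):
--     # staged passes: precompute row sums and the prefix minima (seeded with 100),
--     # a row is a "record" iff its sum beats the minimum of everything before it;
--     # result = records reversed, then the non-records in original order
--     sums = [sum(l) for l in labs]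
--     mins = [100]
--     for s in sums:
--         mins.append(min(mins[-1], s))
--     records = [l for l, s, m in zip(labs, sums, mins) if s < m]
--     others = [l for l, s, m in zip(labs, sums, mins) if s >= m]
--     return records[::-1] + others
-- ===== Notes on version B (the rewrite author's own statement) =====
-- stated objective: alternative
-- what changed: replaces A's single-pass loop that mutates one list via insert(0,..)/append under a running minimum with staged passes: precompute row sums and a prefix-minimum scan, then select record rows and non-record rows by two filters over the zipped triples and concatenate records[::-1] with the rest
import Mathlib
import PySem

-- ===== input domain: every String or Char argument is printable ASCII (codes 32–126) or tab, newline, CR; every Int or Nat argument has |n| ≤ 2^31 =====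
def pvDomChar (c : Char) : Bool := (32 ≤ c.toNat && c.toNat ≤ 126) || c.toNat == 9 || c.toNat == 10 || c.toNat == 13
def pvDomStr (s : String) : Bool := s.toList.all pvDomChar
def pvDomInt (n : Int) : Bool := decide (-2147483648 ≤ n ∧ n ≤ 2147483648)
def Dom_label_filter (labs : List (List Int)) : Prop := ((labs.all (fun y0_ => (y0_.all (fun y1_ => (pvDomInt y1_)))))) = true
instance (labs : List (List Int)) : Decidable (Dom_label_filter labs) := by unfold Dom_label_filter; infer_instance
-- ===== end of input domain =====

-- B replaces A's single-pass loop (one list mutated by insert(0,..)/append under a running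
-- minimum) with staged passes: row sums, a prefix-minimum scan, two filters, one concat.

-- ===== PORT A =====
-- loop over labs carrying (rt_list, cur_min_cnt); insert(0, l) = l :: rt
def labelFilterGoA : List (List Int) → List (List Int) → Int → List (List Int)
  | [], rt, _ => rt
  | l :: ls, rt, m =>
    let s := l.foldl (· + ·) 0
    if s < m then labelFilterGoA ls (l :: rt) s
    else labelFilterGoA ls (rt ++ [l]) m

def label_filter (labs : List (List Int)) : List (List Int) :=
  labelFilterGoA labs [] 100

-- ===== PORT B =====
-- the mins-building loop: mins = [100]; for s in sums: mins.append(min(mins[-1], s))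
def minsLoopB : List Int → List Int → Int → List Int
  | [], acc, _ => acc
  | s :: ss, acc, last => minsLoopB ss (acc ++ [min last s]) (min last s)

def label_filter_alt (labs : List (List Int)) : List (List Int) :=
  let sums := labs.map (fun l => l.foldl (· + ·) 0)
  let mins := minsLoopB sums [100] 100
  let triples := labs.zip (sums.zip mins)   -- zip truncates to the shortest, as Python's zip
  let records := (triples.filter (fun t => decide (t.2.1 < t.2.2))).map (·.1)
  let others := (triples.filter (fun t => decide (t.2.2 ≤ t.2.1))).map (·.1)
  records.reverse ++ others

-- ===== PRECONDITION & SPEC =====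
def Spec_label_filter (labs : List (List Int)) (out : List (List Int)) : Prop := out = label_filter_alt labs
instance (labs : List (List Int)) (out : List (List Int)) : Decidable (Spec_label_filter labs out) := by unfold Spec_label_filter; infer_instance

-- ===== CLAIM (what is proved, stated in full; the proofs are below) =====
def Claim_equal_label_filter : Prop := ∀ (labs : List (List Int)), Dom_label_filter labs → Spec_label_filter labs (label_filter labs)

-- ===== LEMMAS AND PROOFS =====
-- abstract characterisation used by both sides: the record rows / non-record rows
def recSel : List (List Int) → Int → List (List Int)
  | [], _ => []
  | l :: ls, m =>
    let s := l.foldl (· + ·) 0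
    if s < m then l :: recSel ls s else recSel ls m

def othSel : List (List Int) → Int → List (List Int)
  | [], _ => []
  | l :: ls, m =>
    let s := l.foldl (· + ·) 0
    if s < m then othSel ls s else l :: othSel ls m

-- the tail of the mins list produced by minsLoopB
def minsTail : List Int → Int → List Int
  | [], _ => []
  | s :: ss, last => min last s :: minsTail ss (min last s)

theorem minsLoopB_eq (ss : List Int) : ∀ (acc : List Int) (last : Int),
    minsLoopB ss acc last = acc ++ minsTail ss last := by
  induction ss with
  | nil => intro acc last; simp [minsLoopB, minsTail]
  | cons s ss ih => intro acc last; simp [minsLoopB, minsTail, ih]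

theorem records_eq (labs : List (List Int)) : ∀ (m : Int),
    ((labs.zip ((labs.map (fun l => l.foldl (· + ·) 0)).zip
        (m :: minsTail (labs.map (fun l => l.foldl (· + ·) 0)) m))).filter
      (fun t => decide (t.2.1 < t.2.2))).map (·.1) = recSel labs m := by
  induction labs with
  | nil => intro m; simp [recSel, othSel]
  | cons l ls ih =>
    intro m
    simp only [List.map_cons, List.zip_cons_cons, minsTail, List.filter_cons]
    by_cases h : l.foldl (· + ·) 0 < m
    · have hmin : min m (l.foldl (· + ·) 0) = l.foldl (· + ·) 0 := min_eq_right h.le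
      simp [recSel, h, hmin, ih]
    · have hmin : min m (l.foldl (· + ·) 0) = m := min_eq_left (le_of_not_gt h)
      simp [recSel, h, hmin, ih]

theorem others_eq (labs : List (List Int)) : ∀ (m : Int),
    ((labs.zip ((labs.map (fun l => l.foldl (· + ·) 0)).zip
        (m :: minsTail (labs.map (fun l => l.foldl (· + ·) 0)) m))).filter
      (fun t => decide (t.2.2 ≤ t.2.1))).map (·.1) = othSel labs m := by
  induction labs with
  | nil => intro m; simp [recSel, othSel]
  | cons l ls ih =>
    intro m
    simp only [List.map_cons, List.zip_cons_cons, minsTail, List.filter_cons]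
    by_cases h : l.foldl (· + ·) 0 < m
    · have hmin : min m (l.foldl (· + ·) 0) = l.foldl (· + ·) 0 := min_eq_right h.le
      simp [othSel, h, not_le.mpr h, hmin, ih]
    · have hmin : min m (l.foldl (· + ·) 0) = m := min_eq_left (le_of_not_gt h)
      simp [othSel, h, le_of_not_gt h, ih]

theorem goA_eq (labs : List (List Int)) : ∀ (f b : List (List Int)) (m : Int),
    labelFilterGoA labs (f.reverse ++ b) m =
      (recSel labs m).reverse ++ f.reverse ++ b ++ othSel labs m := by
  induction labs with
  | nil => intro f b m; simp [labelFilterGoA, recSel, othSel]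
  | cons l ls ih =>
    intro f b m
    simp only [labelFilterGoA, recSel, othSel]
    by_cases h : l.foldl (· + ·) 0 < m
    · simp only [h, if_pos]
      have h1 : l :: (f.reverse ++ b) = (f ++ [l]).reverse ++ b := by simp
      rw [h1, ih]; simp
    · simp only [h, if_neg, not_false_iff]
      have h1 : (f.reverse ++ b) ++ [l] = f.reverse ++ (b ++ [l]) := by simp
      rw [h1, ih]; simp

-- ===== VERDICT (by name: the statement is the Claim_ definition above) =====
theorem label_filter_spec : Claim_equal_label_filter := by
  intro labs _
  show label_filter labs = label_filter_alt labs
  have hA := goA_eq labs [] [] 100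
  simp only [List.reverse_nil, List.append_nil] at hA
  simp only [label_filter, label_filter_alt, minsLoopB_eq, List.singleton_append, hA,
    records_eq, others_eq]
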